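-- pv_equiv track=rewrite | github.com/barbaragodoy/curso-ai | Laboratório de Programação em Python/revisao01_n2/n2-prova.py | calcular_totais_por_aluno
-- ===== SOURCE A (Python) =====
-- def calcular_totais_por_aluno(dados):
--     """
--     Retorna um dicionário no formato:
--     {
--         "João": {"repeticoes": total_reps, "calorias": total_cal},
--         ...
--     }
--     """
--     totais = {}
--
--     for aluno, exercicio, repeticoes, calorias in dados:
--         if aluno not in totais:
--             totais[aluno] = {"repeticoes": 0, "calorias": 0}
--
--         totais[aluno]["repeticoes"] += repeticoes
--         totais[aluno]["calorias"] += calorias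
--
--     return totais
-- ===== SOURCE B (Python) =====
-- def calcular_totais_por_aluno(dados):
--     alunos = list(dict.fromkeys(a for a, _, _, _ in dados))
--     return {
--         a: {
--             "repeticoes": sum(r for x, _, r, _ in dados if x == a),
--             "calorias": sum(c for x, _, _, c in dados if x == a),
--         }
--         for a in alunos
--     }
-- ===== Notes on version B (the rewrite author's own statement) =====
-- stated objective: alternative
-- what changed: Instead of one pass that incrementally updates a nested dict per row, B first deduplicates the student names (first-appearance order) and then builds each student's totals by summing their rows directly with sum() over the data.
import Mathlib
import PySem

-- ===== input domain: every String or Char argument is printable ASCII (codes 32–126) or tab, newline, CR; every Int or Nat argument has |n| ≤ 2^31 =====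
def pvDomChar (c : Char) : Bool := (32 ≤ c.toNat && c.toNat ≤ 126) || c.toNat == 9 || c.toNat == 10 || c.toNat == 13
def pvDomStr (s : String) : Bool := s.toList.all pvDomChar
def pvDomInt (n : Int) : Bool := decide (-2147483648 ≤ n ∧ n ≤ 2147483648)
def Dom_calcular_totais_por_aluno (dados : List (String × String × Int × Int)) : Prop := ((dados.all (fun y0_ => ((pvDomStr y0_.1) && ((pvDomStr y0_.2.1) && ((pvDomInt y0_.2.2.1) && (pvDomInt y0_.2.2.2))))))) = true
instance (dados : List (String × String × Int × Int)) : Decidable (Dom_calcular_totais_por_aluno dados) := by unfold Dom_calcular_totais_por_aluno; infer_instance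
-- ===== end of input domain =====

-- B replaces A's incremental nested-dict pass by dedup of the names followed by a direct sum per student (alternative decomposition, not faster).

-- ===== PORT A =====
-- the loop body of A (one row folded into the accumulator dict)
def pvStep (totais : PySem.Dict String (PySem.Dict String Int)) (y : String × String × Int × Int) : PySem.Dict String (PySem.Dict String Int) :=
  let aluno := y.1
  let repeticoes := y.2.2.1
  let calorias := y.2.2.2
  let totais := if totais.contains aluno then totais
    else totais.insert aluno (PySem.Dict.ofList [("repeticoes", (0 : Int)), ("calorias", (0 : Int))])
  let inner := totais.getD aluno PySem.Dict.empty
  let inner := inner.insert "repeticoes" (inner.getD "repeticoes" 0 + repeticoes)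
  let inner := inner.insert "calorias" (inner.getD "calorias" 0 + calorias)
  totais.insert aluno inner

def calcular_totais_por_aluno (dados : List (String × String × Int × Int)) : List (String × List (String × Int)) :=
  ((dados.foldl pvStep PySem.Dict.empty).items).map (fun p => (p.1, p.2.items))

-- ===== PORT B =====
def calcular_totais_por_aluno_alt (dados : List (String × String × Int × Int)) : List (String × List (String × Int)) :=
  let alunos := PySem.List.dedup (dados.map (·.1))
  alunos.map (fun a =>
    (a, [("repeticoes", ((dados.filter (fun y => y.1 == a)).map (·.2.2.1)).sum),
         ("calorias", ((dados.filter (fun y => y.1 == a)).map (·.2.2.2)).sum)]))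

-- ===== PRECONDITION & SPEC =====
def Spec_calcular_totais_por_aluno (dados : List (String × String × Int × Int)) (out : List (String × List (String × Int))) : Prop := out = calcular_totais_por_aluno_alt dados
instance (dados : List (String × String × Int × Int)) (out : List (String × List (String × Int))) : Decidable (Spec_calcular_totais_por_aluno dados out) := by unfold Spec_calcular_totais_por_aluno; infer_instance

-- ===== CLAIM (what is proved, stated in full; the proofs are below) =====
def Claim_equal_calcular_totais_por_aluno : Prop := ∀ (dados : List (String × String × Int × Int)), Dom_calcular_totais_por_aluno dados → Spec_calcular_totais_por_aluno dados (calcular_totais_por_aluno dados)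

-- ===== LEMMAS AND PROOFS =====

-- sums of B, as abbreviations for the proofs
def pvSumR (l : List (String × String × Int × Int)) (a : String) : Int :=
  ((l.filter (fun y => y.1 == a)).map (·.2.2.1)).sum
def pvSumC (l : List (String × String × Int × Int)) (a : String) : Int :=
  ((l.filter (fun y => y.1 == a)).map (·.2.2.2)).sum
def pvInner (l : List (String × String × Int × Int)) (a : String) : PySem.Dict String Int :=
  PySem.Dict.mk [("repeticoes", pvSumR l a), ("calorias", pvSumC l a)]

theorem pvSumR_append (l : List (String × String × Int × Int)) (y : String × String × Int × Int) (a : String) :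
    pvSumR (l ++ [y]) a = pvSumR l a + (if y.1 = a then y.2.2.1 else 0) := by
  simp [pvSumR, List.filter_append]
  split_ifs with h <;> simp [h]

theorem pvSumC_append (l : List (String × String × Int × Int)) (y : String × String × Int × Int) (a : String) :
    pvSumC (l ++ [y]) a = pvSumC l a + (if y.1 = a then y.2.2.2 else 0) := by
  simp [pvSumC, List.filter_append]
  split_ifs with h <;> simp [h]

theorem pvSumR_of_not_mem (l : List (String × String × Int × Int)) (a : String)
    (h : a ∉ l.map (·.1)) : pvSumR l a = 0 := by
  have : l.filter (fun y => y.1 == a) = [] := by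
    apply List.filter_eq_nil_iff.mpr
    intro y hy
    simp only [beq_iff_eq]
    intro he
    exact h (he ▸ List.mem_map_of_mem hy)
  simp [pvSumR, this]

theorem pvSumC_of_not_mem (l : List (String × String × Int × Int)) (a : String)
    (h : a ∉ l.map (·.1)) : pvSumC l a = 0 := by
  have : l.filter (fun y => y.1 == a) = [] := by
    apply List.filter_eq_nil_iff.mpr
    intro y hy
    simp only [beq_iff_eq]
    intro he
    exact h (he ▸ List.mem_map_of_mem hy)
  simp [pvSumC, this]

theorem pvInner_append_of_ne (l : List (String × String × Int × Int)) (y : String × String × Int × Int)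
    (a : String) (h : y.1 ≠ a) : pvInner (l ++ [y]) a = pvInner l a := by
  simp [pvInner, pvSumR_append, pvSumC_append, h]


theorem pvUpd (s t r c : Int) :
    (((PySem.Dict.mk [("repeticoes", s), ("calorias", t)]).insert "repeticoes"
        ((PySem.Dict.mk [("repeticoes", s), ("calorias", t)]).getD "repeticoes" 0 + r)).insert "calorias"
        (((PySem.Dict.mk [("repeticoes", s), ("calorias", t)]).insert "repeticoes"
          ((PySem.Dict.mk [("repeticoes", s), ("calorias", t)]).getD "repeticoes" 0 + r)).getD "calorias" 0 + c))
      = PySem.Dict.mk [("repeticoes", s + r), ("calorias", t + c)] := by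
  apply PySem.Dict.ext
  simp [PySem.Dict.insert, PySem.Dict.contains, PySem.Dict.getD, PySem.Dict.get?]

theorem pvUpd' (l : List (String × String × Int × Int)) (a : String) (r c : Int) :
    ((pvInner l a).insert "repeticoes" ((pvInner l a).getD "repeticoes" 0 + r)).insert "calorias"
        ((((pvInner l a).insert "repeticoes"
          ((pvInner l a).getD "repeticoes" 0 + r)).getD "calorias" 0) + c)
      = PySem.Dict.mk [("repeticoes", pvSumR l a + r), ("calorias", pvSumC l a + c)] := by
  simp only [pvInner]
  exact pvUpd _ _ _ _

theorem pvDedup_append (l : List (String × String × Int × Int)) (y : String × String × Int × Int) :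
    PySem.List.dedup ((l ++ [y]).map (·.1)) =
      if y.1 ∈ l.map (·.1) then PySem.List.dedup (l.map (·.1))
      else PySem.List.dedup (l.map (·.1)) ++ [y.1] := by
  rw [List.map_append]
  simp only [PySem.List.dedup, PySem.Set.ofList_eq_foldl, List.foldl_append, List.map_cons,
    List.map_nil, List.foldl_cons, List.foldl_nil]
  rw [← PySem.Set.ofList_eq_foldl]
  by_cases h : y.1 ∈ l.map (·.1) <;>
    simp [PySem.Set.add, PySem.Set.contains, PySem.Set.mem_ofList, h]

-- main invariant: the fold of A builds exactly B's table
theorem pvMain (l : List (String × String × Int × Int)) :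
    l.foldl pvStep PySem.Dict.empty =
      PySem.Dict.mk ((PySem.List.dedup (l.map (·.1))).map (fun a => (a, pvInner l a))) := by
  induction l using List.reverseRecOn with
  | nil => rfl
  | append_singleton l y ih =>
    rw [List.foldl_append, List.foldl_cons, List.foldl_nil, ih]
    have hnd : (PySem.List.dedup (l.map (·.1))).Nodup := PySem.List.nodup_dedup _
    have hkeys : (PySem.Dict.mk ((PySem.List.dedup (l.map (·.1))).map
        (fun a => (a, pvInner l a)))).keys = PySem.List.dedup (l.map (·.1)) := by
      rw [PySem.Dict.keys_mk, List.map_map]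
      simp [Function.comp_def]
    by_cases hmem : y.1 ∈ l.map (·.1)
    · have hc : (PySem.Dict.mk ((PySem.List.dedup (l.map (·.1))).map
          (fun a => (a, pvInner l a)))).contains y.1 = true := by
        rw [PySem.Dict.contains_iff_mem_keys, hkeys, PySem.List.mem_dedup]; exact hmem
      have hget : (PySem.Dict.mk ((PySem.List.dedup (l.map (·.1))).map
          (fun a => (a, pvInner l a)))).getD y.1 PySem.Dict.empty = pvInner l y.1 := by
        refine PySem.Dict.getD_of_mem_items _ ?_ ?_ _
        · exact List.mem_map_of_mem ((PySem.List.mem_dedup _ _).mpr hmem)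
        · rw [hkeys]; exact hnd
      simp only [pvStep]
      rw [if_pos hc, hget, pvUpd']
      apply PySem.Dict.ext
      rw [PySem.Dict.items_insert_of_contains _ _ hc]
      rw [pvDedup_append, if_pos hmem]
      simp only [List.map_map]
      apply List.map_congr_left
      intro a ha
      by_cases hay : a = y.1
      · subst hay
        simp [pvInner, pvSumR_append, pvSumC_append]
      · have hb : (a == y.1) = false := by simp [hay]
        simp only [Function.comp_def, hb, Bool.false_eq_true, if_false]
        rw [pvInner_append_of_ne l y a (Ne.symm hay)]
    · have hc : (PySem.Dict.mk ((PySem.List.dedup (l.map (·.1))).map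
          (fun a => (a, pvInner l a)))).contains y.1 = false := by
        have h1 : ¬ ((PySem.Dict.mk ((PySem.List.dedup (l.map (·.1))).map
            (fun a => (a, pvInner l a)))).contains y.1 = true) := by
          rw [PySem.Dict.contains_iff_mem_keys, hkeys, PySem.List.mem_dedup]; exact hmem
        exact Bool.eq_false_iff.mpr h1
      simp only [pvStep, hc, Bool.false_eq_true, if_false,
        PySem.Dict.getD_insert_self]
      have hofl : PySem.Dict.ofList [("repeticoes", (0 : Int)), ("calorias", (0 : Int))]
          = PySem.Dict.mk [("repeticoes", (0 : Int)), ("calorias", (0 : Int))] := by rfl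
      rw [hofl, pvUpd, PySem.Dict.insert_insert_self]
      apply PySem.Dict.ext
      rw [PySem.Dict.items_insert_of_not_contains _ _ hc]
      rw [pvDedup_append, if_neg hmem]
      simp only [List.map_append, List.map_cons, List.map_nil]
      congr 1
      · apply List.map_congr_left
        intro a ha
        have hay : y.1 ≠ a := by
          intro he; exact hmem (he ▸ (PySem.List.mem_dedup _ _).mp ha)
        rw [pvInner_append_of_ne l y a hay]
      · simp [pvInner, pvSumR_append, pvSumC_append,
          pvSumR_of_not_mem l y.1 hmem, pvSumC_of_not_mem l y.1 hmem]

-- ===== VERDICT (by name: the statement is the Claim_ definition above) =====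
theorem calcular_totais_por_aluno_spec : Claim_equal_calcular_totais_por_aluno := by
  intro dados _
  unfold Spec_calcular_totais_por_aluno calcular_totais_por_aluno calcular_totais_por_aluno_alt
  rw [pvMain]
  simp [pvInner, pvSumR, pvSumC, List.map_map, Function.comp]
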